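-- pv_equiv track=rewrite | github.com/mnasser3/LLMBridge_MN | Proj1/DataPreProcessing/Functions/DataSetManipulation.py | remove_zero_params
-- ===== SOURCE A (Python) =====
-- def remove_zero_params(exercise_list, param_list):
--     result = []
--     for exercise in exercise_list:
--         filtered_exercise = {k: v for k, v in exercise.items()}
--         for param in param_list:
--             if param in filtered_exercise and not any(filtered_exercise[param]):
--                 del filtered_exercise[param]
--
--         result.append(filtered_exercise)
--     return result
-- ===== SOURCE B (Python) =====
-- def remove_zero_params(exercise_list, param_list):
--     params = frozenset(param_list)
--     result = []
--     for exercise in exercise_list: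
--         # stage 1: collect the keys slated for removal
--         dead = {k for k, v in exercise.items() if k in params and not any(v)}
--         # stage 2: rebuild, dropping exactly those keys (plain copy if nothing died)
--         if dead:
--             result.append({k: v for k, v in exercise.items() if k not in dead})
--         else:
--             result.append(dict(exercise))
--     return result
-- ===== Notes on version B (the rewrite author's own statement) =====
-- stated objective: faster
-- what changed: A mutates a full copy of each dict while scanning all of param_list per exercise and deleting in place; B is a two-stage pipeline per exercise: a first pass over the items collects the set of doomed keys, and only if that set is nonempty a second pass rebuilds the dict without them (otherwise a plain copy), never iterating param_list per exercise.
import Mathlib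
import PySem

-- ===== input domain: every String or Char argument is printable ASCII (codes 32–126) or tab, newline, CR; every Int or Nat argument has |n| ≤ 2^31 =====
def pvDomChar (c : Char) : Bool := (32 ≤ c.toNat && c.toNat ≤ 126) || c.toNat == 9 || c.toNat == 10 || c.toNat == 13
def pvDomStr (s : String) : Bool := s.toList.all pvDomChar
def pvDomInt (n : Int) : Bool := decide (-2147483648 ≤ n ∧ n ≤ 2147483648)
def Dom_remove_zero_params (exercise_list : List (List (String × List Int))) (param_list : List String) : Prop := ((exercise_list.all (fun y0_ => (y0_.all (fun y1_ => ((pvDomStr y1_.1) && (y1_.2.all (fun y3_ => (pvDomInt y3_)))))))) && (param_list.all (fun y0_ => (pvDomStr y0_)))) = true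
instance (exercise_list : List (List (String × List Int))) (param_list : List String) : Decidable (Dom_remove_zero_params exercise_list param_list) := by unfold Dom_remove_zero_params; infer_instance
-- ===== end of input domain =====

-- B replaces A's copy-then-delete scheme (copy each dict, then scan param_list deleting all-zero
-- entries from the mutable copy) by a two-stage pass per exercise: first collect the set of doomed
-- keys from the items, then rebuild without them (plain copy if none died); return values only.

-- ===== PORT A =====
-- the loop body 'if param in filtered_exercise and not any(filtered_exercise[param]): del filtered_exercise[param]'
-- (any(v) on a list of ints is 'some element nonzero'; filtered_exercise[param] is guarded by the contains check,
-- so getD is exact here)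
def pvStepA (d : PySem.Dict String (List Int)) (param : String) : PySem.Dict String (List Int) :=
  if d.contains param && !((d.getD param []).any (fun x => !(x == 0))) then d.erase param else d

def remove_zero_params (exercise_list : List (List (String × List Int))) (param_list : List String) : List (List (String × List Int)) :=
  exercise_list.foldl (fun result exercise =>
    -- filtered_exercise = {k: v for k, v in exercise.items()}
    let filtered := (PySem.Dict.mk exercise).items.foldl
        (fun d kv => d.insert kv.1 kv.2) PySem.Dict.empty
    let filtered := param_list.foldl pvStepA filtered
    result ++ [filtered.items]) []

-- ===== PORT B =====
def remove_zero_params_alt (exercise_list : List (List (String × List Int))) (param_list : List String) : List (List (String × List Int)) :=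
  let params : PySem.Set String := PySem.Set.ofList param_list
  exercise_list.foldl (fun result exercise =>
    -- dead = {k for k, v in exercise.items() if k in params and not any(v)}
    let dead : PySem.Set String := PySem.Set.ofList
      ((exercise.filter (fun kv => params.contains kv.1 && !(kv.2.any (fun x => !(x == 0))))).map Prod.fst)
    -- if dead: rebuild without dead keys, else plain copy
    if PySem.Set.len dead ≠ 0 then
      result ++ [exercise.filter (fun kv => !(dead.contains kv.1))]
    else
      result ++ [exercise]) []

-- ===== PRECONDITION & SPEC =====
-- Pre_ excludes assoc lists in which an exercise has duplicate keys: those do not represent a Python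
-- dict (the function's argument type), and reading them as dicts collapses the duplicates.
def Pre_remove_zero_params (exercise_list : List (List (String × List Int))) (param_list : List String) : Prop :=
  ∀ ex ∈ exercise_list, (ex.map Prod.fst).Nodup
instance (exercise_list : List (List (String × List Int))) (param_list : List String) : Decidable (Pre_remove_zero_params exercise_list param_list) := by unfold Pre_remove_zero_params; infer_instance
def pvWitness_remove_zero_params : (List (List (String × List Int))) × List String :=
  ([[("a", [0, 1]), ("b", [0])], [("b", [0, 0])]], ["b", "c"])
def Spec_remove_zero_params (exercise_list : List (List (String × List Int))) (param_list : List String) (out : List (List (String × List Int))) : Prop := out = remove_zero_params_alt exercise_list param_list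
instance (exercise_list : List (List (String × List Int))) (param_list : List String) (out : List (List (String × List Int))) : Decidable (Spec_remove_zero_params exercise_list param_list out) := by unfold Spec_remove_zero_params; infer_instance

-- ===== CLAIM (what is proved, stated in full; the proofs are below) =====
def Claim_equal_remove_zero_params : Prop := ∀ (exercise_list : List (List (String × List Int))) (param_list : List String), Dom_remove_zero_params exercise_list param_list → Pre_remove_zero_params exercise_list param_list → Spec_remove_zero_params exercise_list param_list (remove_zero_params exercise_list param_list)

-- ===== LEMMAS AND PROOFS =====

-- the copy comprehension rebuilds the same dict when keys are distinct
lemma pvCopy (ex : List (String × List Int)) (h : (ex.map Prod.fst).Nodup) :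
    (PySem.Dict.mk ex).items.foldl (fun d kv => d.insert kv.1 kv.2) PySem.Dict.empty
      = PySem.Dict.mk ex := by
  apply PySem.Dict.ext
  have := PySem.Dict.items_foldl_insert_fresh (l := ex) (k := Prod.fst) (v := Prod.snd)
      (d := (PySem.Dict.empty : PySem.Dict String (List Int)))
      (fun a _ => PySem.Dict.contains_empty a.1) h
  simpa using this

-- set(param_list) membership agrees with list membership
lemma pvContains (pl : List String) (k : String) :
    (PySem.Set.ofList pl).contains k = pl.contains k := by
  by_cases hk : k ∈ pl <;>
    simp [PySem.Set.contains_eq_listContains, PySem.Set.mem_ofList, hk]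

-- under distinct keys, the dict lookup of a member's key returns that member's value
lemma pvGetD (l : List (String × List Int)) (h : (l.map Prod.fst).Nodup)
    {x : String × List Int} (hx : x ∈ l) :
    (PySem.Dict.mk l).getD x.1 [] = x.2 := by
  apply PySem.Dict.getD_of_mem_items
  · exact hx
  · simpa [PySem.Dict.keys] using h

-- A's deletion loop over param_list computes exactly the filter of the items by the keep predicate
lemma pvLoop (ps : List String) (l : List (String × List Int)) (h : (l.map Prod.fst).Nodup) :
    (ps.foldl pvStepA (PySem.Dict.mk l)).items
      = l.filter (fun kv => !(ps.contains kv.1 && !(kv.2.any (fun x => !(x == 0))))) := by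
  induction ps generalizing l with
  | nil => simp
  | cons p ps ih =>
    simp only [List.foldl_cons]
    by_cases hc : ((PySem.Dict.mk l).contains p
        && !(((PySem.Dict.mk l).getD p []).any (fun x => !(x == 0)))) = true
    · have hstep : pvStepA (PySem.Dict.mk l) p
          = PySem.Dict.mk (l.filter (fun q => !(q.1 == p))) := by
        unfold pvStepA; rw [if_pos hc]; rfl
      rw [hstep, ih _ (List.Nodup.sublist (List.filter_sublist.map Prod.fst) h)]
      rw [List.filter_filter]
      apply List.filter_congr
      intro x hx
      by_cases hxp : x.1 = p
      · have hg := pvGetD l h hx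
        rw [hxp] at hg
        simp only [Bool.and_eq_true] at hc
        have hz : (x.2.any (fun y => !(y == 0))) = false := by
          rw [← hg]
          simpa using hc.2
        simp [hxp, hz]
      · simp [hxp]
    · have hstep : pvStepA (PySem.Dict.mk l) p = PySem.Dict.mk l := by
        unfold pvStepA; rw [if_neg hc]
      rw [hstep, ih _ h]
      apply List.filter_congr
      intro x hx
      by_cases hxp : x.1 = p
      · have hcont : (PySem.Dict.mk l).contains p = true := by
          show l.any (fun q => q.1 == p) = true
          exact List.any_eq_true.mpr ⟨x, hx, by simp [hxp]⟩
        have hg := pvGetD l h hx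
        rw [hxp] at hg
        have hany : (x.2.any (fun y => !(y == 0))) = true := by
          rw [← hg]
          revert hc
          rw [hcont]
          cases hA : (((PySem.Dict.mk l).getD p []).any fun y => !(y == 0)) <;> simp
        simp [hxp, hany]
      · simp [hxp]

-- membership in the dead-key set decides the per-item predicate (keys are distinct)
lemma pvDead (pl : List String) (l : List (String × List Int)) (h : (l.map Prod.fst).Nodup)
    {x : String × List Int} (hx : x ∈ l) :
    (PySem.Set.ofList ((l.filter (fun kv => (PySem.Set.ofList pl).contains kv.1
        && !(kv.2.any (fun y => !(y == 0))))).map Prod.fst)).contains x.1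
      = (pl.contains x.1 && !(x.2.any (fun y => !(y == 0)))) := by
  rw [show ((PySem.Set.ofList ((l.filter _).map Prod.fst)).contains x.1
        = decide (x.1 ∈ (l.filter (fun kv => (PySem.Set.ofList pl).contains kv.1
            && !(kv.2.any (fun y => !(y == 0))))).map Prod.fst)) from by
      by_cases hm : x.1 ∈ (l.filter (fun kv => (PySem.Set.ofList pl).contains kv.1
            && !(kv.2.any (fun y => !(y == 0))))).map Prod.fst <;>
        simp [PySem.Set.contains_eq_listContains, PySem.Set.mem_ofList, hm]]
  by_cases hp : (pl.contains x.1 && !(x.2.any (fun y => !(y == 0)))) = true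
  · rw [hp]
    simp only [decide_eq_true_eq, List.mem_map]
    exact ⟨x, List.mem_filter.mpr ⟨hx, by rw [pvContains]; exact hp⟩, rfl⟩
  · rw [Bool.not_eq_true] at hp
    rw [hp]
    simp only [decide_eq_false_iff_not, List.mem_map, not_exists]
    rintro q ⟨hq, hk⟩
    rcases List.mem_filter.mp hq with ⟨hql, hqp⟩
    have : q = x := by
      have hinj := List.inj_on_of_nodup_map h
      exact hinj hql hx hk
    rw [this, pvContains] at hqp
    rw [hqp] at hp
    exact absurd hp (by simp)

-- per exercise: A's cleaned items equal B's two-stage result (keys distinct)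
lemma pvItem (pl : List String) (ex : List (String × List Int)) (h : (ex.map Prod.fst).Nodup) :
    (pl.foldl pvStepA ((PySem.Dict.mk ex).items.foldl
        (fun d kv => d.insert kv.1 kv.2) PySem.Dict.empty)).items
      = (if (PySem.Set.ofList ((ex.filter (fun kv => (PySem.Set.ofList pl).contains kv.1
            && !(kv.2.any (fun y => !(y == 0))))).map Prod.fst)).len ≠ 0 then
          ex.filter (fun kv => !((PySem.Set.ofList ((ex.filter (fun kv => (PySem.Set.ofList pl).contains kv.1
            && !(kv.2.any (fun y => !(y == 0))))).map Prod.fst)).contains kv.1))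
        else ex) := by
  rw [pvCopy ex h, pvLoop pl ex h]
  by_cases hd : (PySem.Set.ofList ((ex.filter (fun kv => (PySem.Set.ofList pl).contains kv.1
      && !(kv.2.any (fun y => !(y == 0))))).map Prod.fst)).len ≠ 0
  · rw [if_pos hd]
    apply List.filter_congr
    intro x hx
    rw [pvDead pl ex h hx]
  · rw [if_neg hd]
    push_neg at hd
    apply List.filter_eq_self.mpr
    intro x hx
    have hcontains := pvDead pl ex h hx
    have hlen : (PySem.Set.ofList ((ex.filter (fun kv => (PySem.Set.ofList pl).contains kv.1
        && !(kv.2.any (fun y => !(y == 0))))).map Prod.fst)).length = 0 := by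
      unfold PySem.Set.len at hd
      exact_mod_cast hd
    rw [List.eq_nil_of_length_eq_zero hlen] at hcontains
    simp only [PySem.Set.contains_eq_listContains, List.contains_nil] at hcontains
    have := hcontains.symm
    simp only [Bool.and_eq_false_iff] at this
    simpa using this

-- both outer folds build the same list, for any accumulator
lemma pvOuter (pl : List String) (el : List (List (String × List Int)))
    (h : ∀ ex ∈ el, (ex.map Prod.fst).Nodup) (acc : List (List (String × List Int))) :
    el.foldl (fun result exercise =>
        result ++ [(pl.foldl pvStepA ((PySem.Dict.mk exercise).items.foldl
          (fun d kv => d.insert kv.1 kv.2) PySem.Dict.empty)).items]) acc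
      = el.foldl (fun result exercise =>
          if (PySem.Set.ofList ((exercise.filter (fun kv => (PySem.Set.ofList pl).contains kv.1
              && !(kv.2.any (fun y => !(y == 0))))).map Prod.fst)).len ≠ 0 then
            result ++ [exercise.filter (fun kv => !((PySem.Set.ofList ((exercise.filter
              (fun kv => (PySem.Set.ofList pl).contains kv.1
                && !(kv.2.any (fun y => !(y == 0))))).map Prod.fst)).contains kv.1))]
          else result ++ [exercise]) acc := by
  induction el generalizing acc with
  | nil => rfl
  | cons ex el ih =>
    simp only [List.foldl_cons]
    rw [pvItem pl ex (h ex (List.mem_cons_self ..))]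
    by_cases hd : (PySem.Set.ofList ((ex.filter (fun kv => (PySem.Set.ofList pl).contains kv.1
        && !(kv.2.any (fun y => !(y == 0))))).map Prod.fst)).len ≠ 0
    · rw [if_pos hd, if_pos hd]
      exact ih (fun e he => h e (List.mem_cons_of_mem _ he)) _
    · rw [if_neg hd, if_neg hd]
      exact ih (fun e he => h e (List.mem_cons_of_mem _ he)) _

-- ===== VERDICT (by name: the statement is the Claim_ definition above) =====
theorem remove_zero_params_spec : Claim_equal_remove_zero_params := by
  intro el pl _ hpre
  unfold Spec_remove_zero_params remove_zero_params remove_zero_params_alt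
  exact pvOuter pl el hpre []
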